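-- pv_equiv track=rewrite | github.com/syedkarim2004/simpy.ai | services/reconciler.py | is_equivalent
-- ===== SOURCE A (Python) =====
-- ICD_EQUIVALENCE = {
--     "heart_failure": ["I50.9", "I50.3", "I50.1", "I50.2", "I50.4", "I50.30", "I50.31", "I50.32", "I50.33"],
--     "mitral_valve": ["I34.0", "I34.1", "I34.2"],
--     "tricuspid_valve": ["I36.1", "I36.0", "I36.2"],
--     "anemia": ["D64.9", "D50.9", "D50.0", "D63.1", "D53.9"],
--     "leukocytosis": ["D72.829", "D72.82", "D72.1"],
--     "leukopenia": ["D72.819", "D72.81"],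
--     "thrombocytopenia": ["D69.6", "D69.5", "D69.59"],
--     "thrombocytosis": ["D75.1", "D75.0"],
--     "neutropenia": ["D70.9", "D70.1", "D70.8"],
--     "lymphopenia": ["D72.810", "D72.81"],
--     "coagulation": ["D68.9", "D68.8", "D68.4", "R79.1"],
--     "bone_marrow": ["D61.9", "D61.1", "D61.3"],
--     "tuberculosis": ["A15.0", "A15.9", "A15.6", "A17.0", "A18.2"],
-- }
--
-- def normalize_icd(icd: str) -> str:
--     """Normalize an ICD code for comparison."""
--     if not icd:
--         return ""
--     return icd.strip().upper().replace(" ", "")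
--
-- def is_equivalent(code1: str, code2: str) -> bool:
--     """Check if two ICD codes are clinically equivalent (same disease group)."""
--     c1 = normalize_icd(code1)
--     c2 = normalize_icd(code2)
--
--     for group_name, codes in ICD_EQUIVALENCE.items():
--         normalized_group = [normalize_icd(c) for c in codes]
--         if c1 in normalized_group and c2 in normalized_group:
--             return True
--
--     return False
-- ===== SOURCE B (Python) =====
-- # Static table, stored as a compact whitespace-separated text block:
-- # each line is "<group_name> <code> <code> ...".
-- _DATA = """\
-- heart_failure I50.9 I50.3 I50.1 I50.2 I50.4 I50.30 I50.31 I50.32 I50.33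
-- mitral_valve I34.0 I34.1 I34.2
-- tricuspid_valve I36.1 I36.0 I36.2
-- anemia D64.9 D50.9 D50.0 D63.1 D53.9
-- leukocytosis D72.829 D72.82 D72.1
-- leukopenia D72.819 D72.81
-- thrombocytopenia D69.6 D69.5 D69.59
-- thrombocytosis D75.1 D75.0
-- neutropenia D70.9 D70.1 D70.8
-- lymphopenia D72.810 D72.81
-- coagulation D68.9 D68.8 D68.4 R79.1
-- bone_marrow D61.9 D61.1 D61.3
-- tuberculosis A15.0 A15.9 A15.6 A17.0 A18.2"""
--
-- # Inverted index built once: code -> set of group names containing it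
-- # (codes in the table are already in normalized form).
-- _INDEX = {}
-- for _line in _DATA.splitlines():
--     _group, *_codes = _line.split()
--     for _c in _codes:
--         _INDEX.setdefault(_c, set()).add(_group)
--
-- def normalize_icd(icd: str) -> str:
--     """Normalize an ICD code for comparison."""
--     if not icd:
--         return ""
--     return icd.strip().upper().replace(" ", "")
--
-- def is_equivalent(code1: str, code2: str) -> bool:
--     """Check if two ICD codes are clinically equivalent (same disease group)."""
--     c1 = normalize_icd(code1)
--     c2 = normalize_icd(code2)
--     return bool(_INDEX.get(c1, set()) & _INDEX.get(c2, set()))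
-- ===== Notes on version B (the rewrite author's own statement) =====
-- stated objective: idiomatic
-- what changed: Replaces the per-call scan over all groups (re-normalizing every table code on each call) with an inverted index built once from a compact text table, mapping each code to the set of groups containing it; each call is two lookups and a set intersection.
import Mathlib
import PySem

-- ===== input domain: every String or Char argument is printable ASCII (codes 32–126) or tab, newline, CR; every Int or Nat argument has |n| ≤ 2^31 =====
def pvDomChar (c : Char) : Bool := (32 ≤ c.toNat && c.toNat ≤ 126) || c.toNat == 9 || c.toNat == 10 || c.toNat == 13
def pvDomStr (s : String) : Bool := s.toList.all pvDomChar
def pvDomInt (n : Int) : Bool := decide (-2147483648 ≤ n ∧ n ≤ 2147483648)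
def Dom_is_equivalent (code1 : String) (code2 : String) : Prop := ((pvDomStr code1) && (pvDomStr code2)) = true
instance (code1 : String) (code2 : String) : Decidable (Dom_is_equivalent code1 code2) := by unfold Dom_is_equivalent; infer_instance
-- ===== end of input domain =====

-- B replaces A's per-call scan over all groups by an inverted index (code -> set of groups), parsed once from a compact text table; each call is two lookups and a set intersection (idiomatic, not measured faster).

-- ===== PORT A =====
def ICD_EQUIVALENCE : List (String × List String) :=
  [("heart_failure", ["I50.9", "I50.3", "I50.1", "I50.2", "I50.4", "I50.30", "I50.31", "I50.32", "I50.33"]),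
   ("mitral_valve", ["I34.0", "I34.1", "I34.2"]),
   ("tricuspid_valve", ["I36.1", "I36.0", "I36.2"]),
   ("anemia", ["D64.9", "D50.9", "D50.0", "D63.1", "D53.9"]),
   ("leukocytosis", ["D72.829", "D72.82", "D72.1"]),
   ("leukopenia", ["D72.819", "D72.81"]),
   ("thrombocytopenia", ["D69.6", "D69.5", "D69.59"]),
   ("thrombocytosis", ["D75.1", "D75.0"]),
   ("neutropenia", ["D70.9", "D70.1", "D70.8"]),
   ("lymphopenia", ["D72.810", "D72.81"]),
   ("coagulation", ["D68.9", "D68.8", "D68.4", "R79.1"]),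
   ("bone_marrow", ["D61.9", "D61.1", "D61.3"]),
   ("tuberculosis", ["A15.0", "A15.9", "A15.6", "A17.0", "A18.2"])]

def normalize_icd (icd : String) : String :=
  if icd = "" then ""
  else PySem.Str.replace (PySem.Str.upper (PySem.Str.strip icd)) " " ""

-- A's for-loop with early return, transliterated as structural recursion over the table
def loopA (c1 c2 : String) : List (String × List String) → Bool
  | [] => false
  | (_, codes) :: rest =>
    let normalized_group := codes.map normalize_icd
    if normalized_group.contains c1 && normalized_group.contains c2 then true
    else loopA c1 c2 rest

def is_equivalent (code1 : String) (code2 : String) : Bool :=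
  let c1 := normalize_icd code1
  let c2 := normalize_icd code2
  loopA c1 c2 ICD_EQUIVALENCE

-- ===== PORT B =====
-- compact text table: each line is "<group_name> <code> <code> ..."
def icdData : String :=
  "heart_failure I50.9 I50.3 I50.1 I50.2 I50.4 I50.30 I50.31 I50.32 I50.33\nmitral_valve I34.0 I34.1 I34.2\ntricuspid_valve I36.1 I36.0 I36.2\nanemia D64.9 D50.9 D50.0 D63.1 D53.9\nleukocytosis D72.829 D72.82 D72.1\nleukopenia D72.819 D72.81\nthrombocytopenia D69.6 D69.5 D69.59\nthrombocytosis D75.1 D75.0\nneutropenia D70.9 D70.1 D70.8\nlymphopenia D72.810 D72.81\ncoagulation D68.9 D68.8 D68.4 R79.1\nbone_marrow D61.9 D61.1 D61.3\ntuberculosis A15.0 A15.9 A15.6 A17.0 A18.2"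

-- inverted index parsed once from icdData: code -> set of group names containing it
def icdIndex : PySem.Dict String (PySem.Set String) :=
  (PySem.Str.splitlines icdData).foldl
    (fun d line =>
      match PySem.Str.split₀ line with
      | [] => d
      | group :: codes =>
        codes.foldl
          (fun d c => d.modify c PySem.Set.empty (fun s => PySem.Set.add s group)) d)
    PySem.Dict.empty

def is_equivalent_alt (code1 : String) (code2 : String) : Bool :=
  let c1 := normalize_icd code1
  let c2 := normalize_icd code2
  !(PySem.Set.inter (icdIndex.getD c1 PySem.Set.empty) (icdIndex.getD c2 PySem.Set.empty)).isEmpty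

-- ===== PRECONDITION & SPEC =====
def Spec_is_equivalent (code1 : String) (code2 : String) (out : Bool) : Prop := out = is_equivalent_alt code1 code2
instance (code1 : String) (code2 : String) (out : Bool) : Decidable (Spec_is_equivalent code1 code2 out) := by unfold Spec_is_equivalent; infer_instance

-- ===== CLAIM (what is proved, stated in full; the proofs are below) =====
def Claim_equal_is_equivalent : Prop := ∀ (code1 : String) (code2 : String), Dom_is_equivalent code1 code2 → Spec_is_equivalent code1 code2 (is_equivalent code1 code2)

-- ===== LEMMAS AND PROOFS =====

-- A's loop returns true iff some group contains both normalized codes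
theorem loopA_iff (c1 c2 : String) (t : List (String × List String)) :
    loopA c1 c2 t = true ↔ ∃ p ∈ t, c1 ∈ p.2.map normalize_icd ∧ c2 ∈ p.2.map normalize_icd := by
  induction t with
  | nil => simp [loopA]
  | cons hd tl ih =>
    obtain ⟨g, codes⟩ := hd
    simp only [loopA, List.mem_cons]
    split_ifs with h
    · simp only [Bool.and_eq_true, List.contains_iff_mem] at h
      constructor
      · intro _; exact ⟨(g, codes), Or.inl rfl, h.1, h.2⟩
      · intro _; rfl
    · rw [ih]
      constructor
      · rintro ⟨p, hp, h1, h2⟩; exact ⟨p, Or.inr hp, h1, h2⟩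
      · rintro ⟨p, hp, h1, h2⟩
        rcases hp with rfl | hp
        · exfalso; apply h
          simp only [Bool.and_eq_true, List.contains_iff_mem]; exact ⟨h1, h2⟩
        · exact ⟨p, hp, h1, h2⟩

-- parsing the compact text table recovers exactly A's table, line by line
set_option maxRecDepth 10000 in
set_option maxHeartbeats 2000000 in
theorem parsed_eq : (PySem.Str.splitlines icdData).map PySem.Str.split₀ = ICD_EQUIVALENCE.map (fun p => p.1 :: p.2) := by decide

-- every code in the table is already in normalized form
theorem map_norm : ∀ p ∈ ICD_EQUIVALENCE, p.2.map normalize_icd = p.2 := by decide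

-- B's parse-and-fold equals the same fold taken directly over A's table
-- membership in the index after the inner loop over one group's code list
theorem mem_inner (gname : String) (codes : List String)
    (d : PySem.Dict String (PySem.Set String)) (c g : String) :
    g ∈ (codes.foldl (fun d c => d.modify c PySem.Set.empty
          (fun s => PySem.Set.add s gname)) d).getD c PySem.Set.empty
      ↔ g ∈ d.getD c PySem.Set.empty ∨ (g = gname ∧ c ∈ codes) := by
  induction codes generalizing d with
  | nil => simp
  | cons hd tl ih =>
    simp only [List.foldl_cons, ih, List.mem_cons]
    rw [PySem.Dict.getD_modify]
    split_ifs with h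
    · subst h
      rw [PySem.Set.mem_add]
      tauto
    · constructor
      · rintro (hm | hr)
        · exact Or.inl hm
        · exact Or.inr ⟨hr.1, Or.inr hr.2⟩
      · rintro (hm | ⟨rfl, hc | hc⟩)
        · exact Or.inl hm
        · exact absurd hc h
        · exact Or.inr ⟨rfl, hc⟩

-- membership in the index after folding one parsed line
theorem mem_lines (ls : List String)
    (d : PySem.Dict String (PySem.Set String)) (c g : String) :
    g ∈ (ls.foldl (fun d line =>
          match PySem.Str.split₀ line with
          | [] => d
          | group :: codes => codes.foldl
              (fun d c => d.modify c PySem.Set.empty (fun s => PySem.Set.add s group)) d) d).getD c PySem.Set.empty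
      ↔ g ∈ d.getD c PySem.Set.empty ∨ ∃ l ∈ ls, ∃ cs, PySem.Str.split₀ l = g :: cs ∧ c ∈ cs := by
  induction ls generalizing d with
  | nil => simp
  | cons hd tl ih =>
    simp only [List.foldl_cons, List.mem_cons]
    rcases hsp : PySem.Str.split₀ hd with _ | ⟨g0, cs0⟩
    · rw [ih]
      constructor
      · rintro (hm | hr)
        · exact Or.inl hm
        · obtain ⟨l, hl, cs, h1, h2⟩ := hr
          exact Or.inr ⟨l, Or.inr hl, cs, h1, h2⟩
      · rintro (hm | ⟨l, (rfl | hl), cs, h1, h2⟩)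
        · exact Or.inl hm
        · rw [hsp] at h1; cases h1
        · exact Or.inr ⟨l, hl, cs, h1, h2⟩
    · rw [ih, mem_inner]
      constructor
      · rintro ((hm | ⟨rfl, hc⟩) | ⟨l, hl, cs, h1, h2⟩)
        · exact Or.inl hm
        · exact Or.inr ⟨hd, Or.inl rfl, cs0, hsp, hc⟩
        · exact Or.inr ⟨l, Or.inr hl, cs, h1, h2⟩
      · rintro (hm | ⟨l, (rfl | hl), cs, h1, h2⟩)
        · exact Or.inl (Or.inl hm)
        · rw [hsp] at h1
          cases h1
          exact Or.inl (Or.inr ⟨rfl, h2⟩)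
        · exact Or.inr ⟨l, hl, cs, h1, h2⟩

theorem mem_icdIndex (c g : String) :
    g ∈ icdIndex.getD c PySem.Set.empty
      ↔ ∃ p ∈ ICD_EQUIVALENCE, p.1 = g ∧ c ∈ p.2 := by
  rw [icdIndex, mem_lines]
  simp only [PySem.Dict.getD_empty, PySem.Set.empty, List.not_mem_nil, false_or]
  constructor
  · rintro ⟨l, hl, cs, h1, h2⟩
    have hm : (g :: cs) ∈ (PySem.Str.splitlines icdData).map PySem.Str.split₀ :=
      h1 ▸ List.mem_map_of_mem hl
    rw [parsed_eq] at hm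
    obtain ⟨p, hp, heq⟩ := List.mem_map.mp hm
    cases heq
    exact ⟨p, hp, rfl, h2⟩
  · rintro ⟨p, hp, rfl, hc⟩
    have hm : (p.1 :: p.2) ∈ ICD_EQUIVALENCE.map (fun p => p.1 :: p.2) :=
      List.mem_map_of_mem hp
    rw [← parsed_eq] at hm
    obtain ⟨l, hl, heq⟩ := List.mem_map.mp hm
    exact ⟨l, hl, p.2, heq, hc⟩

theorem group_names_nodup : (ICD_EQUIVALENCE.map Prod.fst).Nodup := by decide

theorem main_eq (c1 c2 : String) :
    loopA c1 c2 ICD_EQUIVALENCE =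
      !(PySem.Set.inter (icdIndex.getD c1 PySem.Set.empty) (icdIndex.getD c2 PySem.Set.empty)).isEmpty := by
  rw [Bool.eq_iff_iff, loopA_iff]
  simp only [Bool.not_eq_eq_eq_not, Bool.not_true, List.isEmpty_eq_false_iff_exists_mem]
  constructor
  · rintro ⟨p, hp, h1, h2⟩
    rw [map_norm p hp] at h1 h2
    refine ⟨p.1, (PySem.Set.mem_inter _ _ _).mpr ⟨?_, ?_⟩⟩
    · exact (mem_icdIndex _ _).mpr ⟨p, hp, rfl, h1⟩
    · exact (mem_icdIndex _ _).mpr ⟨p, hp, rfl, h2⟩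
  · rintro ⟨g, hg⟩
    obtain ⟨hg1, hg2⟩ := (PySem.Set.mem_inter _ _ _).mp hg
    obtain ⟨p, hp, hpg, h1⟩ := (mem_icdIndex _ _).mp hg1
    obtain ⟨q, hq, hqg, h2⟩ := (mem_icdIndex _ _).mp hg2
    have hpq : p = q :=
      List.inj_on_of_nodup_map group_names_nodup hp hq (hpg.trans hqg.symm)
    refine ⟨p, hp, ?_, ?_⟩
    · rw [map_norm p hp]; exact h1
    · rw [map_norm p hp]; exact hpq ▸ h2

-- ===== VERDICT (by name: the statement is the Claim_ definition above) =====
theorem is_equivalent_spec : Claim_equal_is_equivalent := by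
  intro code1 code2 _
  unfold Spec_is_equivalent is_equivalent is_equivalent_alt
  exact main_eq _ _
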